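-- pv_equiv track=rewrite | github.com/ckerr6/talent-intelligence-complete | diagnostic_tools/analyze_database_overlap.py | format_set_analysis
-- ===== SOURCE A (Python) =====
-- from typing import Dict, Set, List, Any
--
-- def format_set_analysis(data_dict: Dict[str, Set[str]]) -> Dict:
--     """Format set analysis for JSON output"""
--     result = {}
--     databases = list(data_dict.keys())
--
--     for i, db1 in enumerate(databases):
--         for db2 in databases[i+1:]:
--             set1 = data_dict[db1]
--             set2 = data_dict[db2]
--
--             intersection = set1 & set2
--             only_in_1 = set1 - set2
--             only_in_2 = set2 - set1
--
--             key = f"{db1}_vs_{db2}"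
--             result[key] = {
--                 'in_both': len(intersection),
--                 f'only_in_{db1}': len(only_in_1),
--                 f'only_in_{db2}': len(only_in_2),
--                 'total_unique': len(set1 | set2)
--             }
--
--     return result
-- ===== SOURCE B (Python) =====
-- def _ordered_pairs(dbs):
--     """All (earlier, later) pairs of a list, in order."""
--     pairs = []
--     rest = list(dbs)
--     while rest:
--         d1 = rest[0]
--         rest = rest[1:]
--         for d2 in rest:
--             pairs.append((d1, d2))
--     return pairs
--
--
-- def format_set_analysis(data_dict):
--     """Format set analysis for JSON output (element-centric co-occurrence counting)."""
--     databases = list(data_dict.keys())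
--
--     sizes = {}
--     for db, s in data_dict.items():
--         sizes[db] = len(s)
--
--     inverted = {}
--     for db, s in data_dict.items():
--         for x in s:
--             inverted.setdefault(x, []).append(db)
--
--     pair_list = []
--     for dbs in inverted.values():
--         pair_list.extend(_ordered_pairs(dbs))
--
--     co = {}
--     for q in pair_list:
--         co[q] = co.get(q, 0) + 1
--
--     result = {}
--     for i, db1 in enumerate(databases):
--         for db2 in databases[i + 1:]:
--             b = co.get((db1, db2), 0)
--             s1 = sizes[db1]
--             s2 = sizes[db2]
--             result[f"{db1}_vs_{db2}"] = {
--                 'in_both': b,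
--                 f'only_in_{db1}': s1 - b,
--                 f'only_in_{db2}': s2 - b,
--                 'total_unique': s1 + s2 - b,
--             }
--     return result
-- ===== Notes on version B (the rewrite author's own statement) =====
-- stated objective: alternative
-- what changed: Replaces A's pair-centric set algebra (intersection/difference/union materialized for every database pair) by an element-centric pass: an inverted index element->databases yields co-occurrence counts per ordered pair, and only_in/total_unique are derived arithmetically from precomputed set sizes.
import Mathlib
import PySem

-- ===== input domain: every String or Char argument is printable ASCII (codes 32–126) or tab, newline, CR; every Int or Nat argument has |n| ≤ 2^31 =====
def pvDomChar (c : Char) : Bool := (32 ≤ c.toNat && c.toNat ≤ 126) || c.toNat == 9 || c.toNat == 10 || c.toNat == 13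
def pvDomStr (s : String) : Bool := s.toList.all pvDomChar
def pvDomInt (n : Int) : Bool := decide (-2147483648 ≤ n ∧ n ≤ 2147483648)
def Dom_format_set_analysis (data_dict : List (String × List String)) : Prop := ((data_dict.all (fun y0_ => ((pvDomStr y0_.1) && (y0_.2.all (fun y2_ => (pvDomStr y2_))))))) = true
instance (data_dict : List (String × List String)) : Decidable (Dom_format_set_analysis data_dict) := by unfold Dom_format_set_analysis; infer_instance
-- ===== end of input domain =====

-- B replaces A's per-pair set intersections/differences/unions by one element-centric
-- co-occurrence count plus size arithmetic; equivalence of the RETURN value is proved on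
-- inputs that encode a Python dict of sets (distinct keys, duplicate-free value lists).

-- ===== PORT A =====
-- loop body of A: the inner dict literal (its four keys are pairwise distinct when db1 ≠ db2)
def fsaPairStatsA (d : PySem.Dict String (List String)) (db1 db2 : String) : List (String × Int) :=
  let set1 := d.getD db1 []          -- data_dict[db1]; db1 is always a key, so no KeyError
  let set2 := d.getD db2 []
  let inter := PySem.Set.inter set1 set2
  let only1 := PySem.Set.diff set1 set2
  let only2 := PySem.Set.diff set2 set1
  [("in_both", (inter.length : Int)),
   ("only_in_" ++ db1, (only1.length : Int)),
   ("only_in_" ++ db2, (only2.length : Int)),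
   ("total_unique", ((PySem.Set.union set1 set2).length : Int))]

def format_set_analysis (data_dict : List (String × List String)) : List (String × List (String × Int)) :=
  let d := PySem.Dict.mk data_dict
  let databases := d.keys
  let result := (PySem.List.enumerate databases).foldl (fun result p =>
      (PySem.List.slice databases (some (p.1 + 1)) none).foldl (fun result db2 =>
        result.insert (p.2 ++ "_vs_" ++ db2) (fsaPairStatsA d p.2 db2)) result)
    PySem.Dict.empty
  result.items

-- ===== PORT B =====
-- _ordered_pairs(dbs): while rest: d1 = rest.pop(0); for d2 in rest: pairs.append((d1, d2))
def ordPairs (dbs : List String) : List (String × String) :=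
  match dbs with
  | [] => []
  | d1 :: rest => rest.map (fun d2 => (d1, d2)) ++ ordPairs rest

-- loop body of B's emission loop: pure arithmetic from the co-occurrence counter and the sizes
def fsaPairStatsB (co : PySem.Dict (String × String) Int) (sizes : PySem.Dict String Int)
    (db1 db2 : String) : List (String × Int) :=
  let b := co.getD (db1, db2) 0
  let s1 := sizes.getD db1 0
  let s2 := sizes.getD db2 0
  [("in_both", b),
   ("only_in_" ++ db1, s1 - b),
   ("only_in_" ++ db2, s2 - b),
   ("total_unique", s1 + s2 - b)]

def format_set_analysis_alt (data_dict : List (String × List String)) : List (String × List (String × Int)) :=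
  let d := PySem.Dict.mk data_dict
  let databases := d.keys
  let sizes := data_dict.foldl (fun s p => s.insert p.1 ((p.2.length : Int))) PySem.Dict.empty
  let inverted := data_dict.foldl (fun inv p =>
      p.2.foldl (fun inv x => inv.modify x [] (· ++ [p.1])) inv) PySem.Dict.empty
  let pair_list := inverted.values.foldl (fun acc dbs => acc ++ ordPairs dbs) []
  let co := pair_list.foldl (fun c q => c.insert q (c.getD q 0 + 1)) PySem.Dict.empty
  let result := (PySem.List.enumerate databases).foldl (fun result p =>
      (PySem.List.slice databases (some (p.1 + 1)) none).foldl (fun result db2 =>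
        result.insert (p.2 ++ "_vs_" ++ db2) (fsaPairStatsB co sizes p.2 db2)) result)
    PySem.Dict.empty
  result.items

-- ===== PRECONDITION & SPEC =====
-- Pre_ only states that the argument really encodes a Python dict[str, set[str]]:
-- keys pairwise distinct (a dict) and every value list duplicate-free (a set).
def Pre_format_set_analysis (data_dict : List (String × List String)) : Prop :=
  (data_dict.map Prod.fst).Nodup ∧ ∀ p ∈ data_dict, p.2.Nodup
instance (data_dict : List (String × List String)) : Decidable (Pre_format_set_analysis data_dict) := by
  unfold Pre_format_set_analysis; infer_instance

def pvWitness_format_set_analysis : (List (String × List String)) :=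
  [("a", ["x", "y"]), ("b", ["y", "z"]), ("c", [])]

def Spec_format_set_analysis (data_dict : List (String × List String)) (out : List (String × List (String × Int))) : Prop := out = format_set_analysis_alt data_dict
instance (data_dict : List (String × List String)) (out : List (String × List (String × Int))) : Decidable (Spec_format_set_analysis data_dict out) := by unfold Spec_format_set_analysis; infer_instance

-- ===== CLAIM (what is proved, stated in full; the proofs are below) =====
def Claim_equal_format_set_analysis : Prop := ∀ (data_dict : List (String × List String)), Dom_format_set_analysis data_dict → Pre_format_set_analysis data_dict → Spec_format_set_analysis data_dict (format_set_analysis data_dict)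

-- ===== LEMMAS AND PROOFS =====

-- generic congruence for the two identically-shaped nested emission loops
theorem nested_foldl_congr {α β σ : Type} (l : List α) (m : α → List β) (f g : σ → α → β → σ)
    (init : σ) (h : ∀ a ∈ l, ∀ b ∈ m a, ∀ s, f s a b = g s a b) :
    l.foldl (fun s a => (m a).foldl (fun s b => f s a b) s) init
      = l.foldl (fun s a => (m a).foldl (fun s b => g s a b) s) init := by
  refine PySem.List.foldl_congr_mem l _ _ init ?_
  intro acc a ha
  exact PySem.List.foldl_congr_mem (m a) _ _ acc (fun s b hb => h a ha b hb s)

-- a nested fold over a list of lists is the fold over the flattened list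
theorem foldl_flatMap_eq {α β σ : Type} (l : List α) (f : α → List β) (g : σ → β → σ) :
    ∀ (init : σ), (l.flatMap f).foldl g init = l.foldl (fun s a => (f a).foldl g s) init := by
  induction l with
  | nil => intro init; rfl
  | cons a t ih => intro init; simp [List.flatMap_cons, List.foldl_append, ih]

theorem mem_ordPairs_fst {dbs : List String} {q : String × String} (h : q ∈ ordPairs dbs) :
    q.1 ∈ dbs := by
  induction dbs with
  | nil => simp [ordPairs] at h
  | cons d t ih =>
    simp only [ordPairs, List.mem_append, List.mem_map] at h
    rcases h with ⟨d2, _, rfl⟩ | h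
    · exact List.mem_cons_self
    · exact List.mem_cons_of_mem _ (ih h)

theorem count_ordPairs_of_not_mem {dbs : List String} {db1 y : String} (h : db1 ∉ dbs) :
    (ordPairs dbs).count (db1, y) = 0 :=
  List.count_eq_zero.2 (fun hm => h (mem_ordPairs_fst hm))

theorem count_map_pair_self (bs : List String) (c y : String) :
    (bs.map (fun d2 => (c, d2))).count (c, y) = bs.count y := by
  exact List.count_map_of_injective bs (fun d2 => (c, d2))
    (fun a b hab => by simpa using hab) y

theorem count_ordPairs_append (a b : List String) (q : String × String) :
    (ordPairs (a ++ b)).count q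
      = (ordPairs a).count q + (ordPairs b).count q
        + (a.flatMap (fun d1 => b.map (fun d2 => (d1, d2)))).count q := by
  induction a with
  | nil => simp [ordPairs]
  | cons c t ih =>
    simp only [List.cons_append, ordPairs, List.count_append, List.map_append,
      List.flatMap_cons, ih]
    omega

theorem count_nodup {v : List String} (hv : v.Nodup) (x : String) :
    v.count x = if x ∈ v then 1 else 0 := by
  have h1 := List.nodup_iff_count_le_one.1 hv x
  by_cases hx : x ∈ v
  · have := List.count_pos_iff.2 hx
    simp [hx]; omega
  · simp [hx, List.count_eq_zero.2 hx]

-- counting the pair (db1, db2) among the ordered pairs of u ++ mid ++ v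
theorem count_ordPairs_three (u mid v : List String) (db1 db2 : String)
    (h1u : db1 ∉ u) (h1v : db1 ∉ v)
    (hmid : mid = [db1] ∨ mid = []) (hv : v.Nodup) :
    (ordPairs (u ++ (mid ++ v))).count (db1, db2)
      = if db1 ∈ mid ∧ db2 ∈ v then 1 else 0 := by
  rw [count_ordPairs_append]
  have hcross : (u.flatMap (fun d1 => (mid ++ v).map (fun d2 => (d1, d2)))).count (db1, db2) = 0 := by
    refine List.count_eq_zero.2 ?_
    intro hm
    rcases List.mem_flatMap.1 hm with ⟨d1, hd1, hq⟩
    rcases List.mem_map.1 hq with ⟨d2, _, hq2⟩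
    have : d1 = db1 := congrArg Prod.fst hq2
    exact h1u (this ▸ hd1)
  rw [count_ordPairs_of_not_mem h1u, hcross]
  rcases hmid with rfl | rfl
  · have : ordPairs (db1 :: v) = v.map (fun d2 => (db1, d2)) ++ ordPairs v := rfl
    rw [List.singleton_append, this, List.count_append, count_map_pair_self,
      count_ordPairs_of_not_mem h1v, count_nodup hv]
    simp
  · rw [List.nil_append, count_ordPairs_of_not_mem h1v]
    simp

-- two duplicate-free filters with the same membership have the same length
theorem filter_length_eq_of_mem_iff {l1 l2 : List String} {p q : String → Bool}
    (h1 : l1.Nodup) (h2 : l2.Nodup)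
    (h : ∀ x, (x ∈ l1 ∧ p x = true) ↔ (x ∈ l2 ∧ q x = true)) :
    (l1.filter p).length = (l2.filter q).length := by
  refine List.Perm.length_eq ?_
  refine (List.perm_ext_iff_of_nodup (h1.filter p) (h2.filter q)).2 ?_
  intro x
  simp only [List.mem_filter]
  exact h x


-- proof-only names for B's intermediate data structures (definitionally the port's lets)
def pvSizes (dd : List (String × List String)) : PySem.Dict String Int :=
  dd.foldl (fun s p => s.insert p.1 ((p.2.length : Int))) PySem.Dict.empty

def pvInverted (dd : List (String × List String)) : PySem.Dict String (List String) :=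
  dd.foldl (fun inv p => p.2.foldl (fun inv x => inv.modify x [] (· ++ [p.1])) inv) PySem.Dict.empty

def pvPairList (dd : List (String × List String)) : List (String × String) :=
  (pvInverted dd).values.foldl (fun acc dbs => acc ++ ordPairs dbs) []

def pvCo (dd : List (String × List String)) : PySem.Dict (String × String) Int :=
  (pvPairList dd).foldl (fun c q => c.insert q (c.getD q 0 + 1)) PySem.Dict.empty

def pvFlat (dd : List (String × List String)) : List (String × String) :=
  dd.flatMap (fun p => p.2.map (fun y => (y, p.1)))

theorem inverted_eq_flat (dd : List (String × List String)) :
    pvInverted dd = (pvFlat dd).foldl (fun inv q => inv.modify q.1 [] (· ++ [q.2])) PySem.Dict.empty := by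
  rw [pvInverted, pvFlat, foldl_flatMap_eq]
  refine PySem.List.foldl_congr_mem _ _ _ _ ?_
  intro acc p _
  rw [List.foldl_map]

-- the per-element database list of the inverted index, as a filtered key list
theorem block_eq (L : List (String × List String)) (hv : ∀ p ∈ L, p.2.Nodup) (x : String) :
    ((L.flatMap (fun p => p.2.map (fun y => (y, p.1)))).filter (fun q => q.1 == x)).map Prod.snd
      = (L.filter (fun p => p.2.contains x)).map Prod.fst := by
  induction L with
  | nil => rfl
  | cons p t ih =>
    have hpn : p.2.Nodup := hv p List.mem_cons_self
    have iht := ih (fun q hq => hv q (List.mem_cons_of_mem _ hq))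
    simp only [List.flatMap_cons, List.filter_append, List.map_append, iht]
    have : (List.filter (fun q => q.1 == x) (p.2.map (fun y => (y, p.1)))).map Prod.snd
        = ((p.2.filter (fun y => y == x)).map (fun y => (y, p.1))).map Prod.snd := by
      rw [List.filter_map]; rfl
    rw [this, List.filter_beq, List.map_replicate, List.map_replicate,
      count_nodup hpn, List.filter_cons]
    by_cases hx : x ∈ p.2
    · simp [hx]
    · simp [hx]

theorem count_sum (E : List String) (dbs : String → List String) (db1 db2 : String)
    (s1 s2 : List String)
    (h : ∀ x, (ordPairs (dbs x)).count (db1, db2) = if x ∈ s1 ∧ x ∈ s2 then 1 else 0) :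
    ((E.map dbs).flatMap ordPairs).count (db1, db2)
      = (E.filter (fun x => decide (x ∈ s1 ∧ x ∈ s2))).length := by
  induction E with
  | nil => rfl
  | cons x t ih =>
    rw [List.map_cons, List.flatMap_cons, List.count_append, ih, h x, List.filter_cons]
    by_cases hx : x ∈ s1 ∧ x ∈ s2
    · simp [hx]
      omega
    · simp [hx]

-- per element x: how often the pair (db1, db2) occurs among x's ordered database pairs
theorem per_elem_count (U V : List (String × List String)) (db1 db2 : String)
    (s1 s2 : List String)
    (hkeys : ((U ++ (db1, s1) :: V).map Prod.fst).Nodup)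
    (h2 : (db2, s2) ∈ V) (x : String) :
    (ordPairs ((((U ++ (db1, s1) :: V).filter (fun p => p.2.contains x)).map Prod.fst))).count (db1, db2)
      = if x ∈ s1 ∧ x ∈ s2 then 1 else 0 := by
  have h' : ((U.map Prod.fst) ++ db1 :: (V.map Prod.fst)).Nodup := by
    simpa using hkeys
  have hndc : (db1 :: V.map Prod.fst).Nodup := (List.nodup_append.1 h').2.1
  have hdisj := (List.nodup_append.1 h').2.2
  have hU1 : db1 ∉ U.map Prod.fst := by
    intro hm
    exact (hdisj db1 hm db1 List.mem_cons_self) rfl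
  have hV1 : db1 ∉ V.map Prod.fst := (List.nodup_cons.1 hndc).1
  have hVnd : (V.map Prod.fst).Nodup := (List.nodup_cons.1 hndc).2
  have hne : db2 ≠ db1 := by
    intro he; exact hV1 (he ▸ List.mem_map.2 ⟨(db2, s2), h2, rfl⟩)
  rw [List.filter_append, List.filter_cons, List.map_append]
  set c : (String × List String) → Bool := fun p => p.2.contains x with hc
  have hFU : db1 ∉ (U.filter c).map Prod.fst := fun hm =>
    hU1 ((List.filter_sublist.map Prod.fst).mem hm)
  have hFV : db1 ∉ (V.filter c).map Prod.fst := fun hm =>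
    hV1 ((List.filter_sublist.map Prod.fst).mem hm)
  have hFVnd : ((V.filter c).map Prod.fst).Nodup :=
    (List.filter_sublist.map Prod.fst).nodup hVnd
  have hmemFV : db2 ∈ (V.filter c).map Prod.fst ↔ x ∈ s2 := by
    constructor
    · intro hm
      rcases List.mem_map.1 hm with ⟨q, hq, hq1⟩
      rcases List.mem_filter.1 hq with ⟨hqV, hqc⟩
      have : q = (db2, s2) := List.inj_on_of_nodup_map hVnd hqV h2 (by simp [hq1])
      rw [this] at hqc
      simpa [hc] using hqc
    · intro hm
      refine List.mem_map.2 ⟨(db2, s2), List.mem_filter.2 ⟨h2, ?_⟩, rfl⟩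
      simp [hc, hm]
  by_cases hx1 : x ∈ s1
  · have : c (db1, s1) = true := by simp [hc, hx1]
    rw [if_pos this, List.map_cons]
    have h3 := count_ordPairs_three ((U.filter c).map Prod.fst) [db1] ((V.filter c).map Prod.fst)
      db1 db2 hFU hFV (Or.inl rfl) hFVnd
    rw [List.singleton_append] at h3
    rw [h3]
    by_cases hx2 : x ∈ s2
    · simp [hx1, hx2, hmemFV.2 hx2]
    · have : db2 ∉ (V.filter c).map Prod.fst := fun hm => hx2 (hmemFV.1 hm)
      simp [hx1, hx2, this]
  · have : c (db1, s1) = false := by simp [hc, hx1]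
    rw [if_neg (by simp [hx1])]
    have h3 := count_ordPairs_three ((U.filter c).map Prod.fst) [] ((V.filter c).map Prod.fst)
      db1 db2 hFU hFV (Or.inr rfl) hFVnd
    rw [List.nil_append] at h3
    rw [h3]
    simp [hx1]

-- the co-occurrence counter read at (db1, db2) is the intersection size
theorem co_count (U V : List (String × List String)) (db1 db2 : String) (s1 s2 : List String)
    (hkeys : ((U ++ (db1, s1) :: V).map Prod.fst).Nodup)
    (hvals : ∀ p ∈ U ++ (db1, s1) :: V, p.2.Nodup)
    (h2 : (db2, s2) ∈ V) :
    (pvCo (U ++ (db1, s1) :: V)).getD (db1, db2) 0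
      = ((s1.filter (fun y => s2.contains y)).length : Int) := by
  set dd := U ++ (db1, s1) :: V with hdd
  have hmem1 : (db1, s1) ∈ dd := by simp [hdd]
  have hs1 : s1.Nodup := hvals (db1, s1) hmem1
  have hs2 : s2.Nodup := hvals (db2, s2) (by simp [hdd, h2])
  -- the counter reads off a list count
  have hco : (pvCo dd).getD (db1, db2) 0 = ((pvPairList dd).count (db1, db2) : Int) := by
    rw [pvCo, PySem.Dict.getD_foldl_insert_add_one, PySem.Dict.getD_empty]
    ring
  rw [hco]
  -- the pair list is the concatenation of each element's ordered database pairs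
  have hpl : pvPairList dd = (pvInverted dd).values.flatMap ordPairs := by
    rw [pvPairList, PySem.List.foldl_append_eq_flatMap, List.nil_append]
  -- inverted-index structure
  have hkn : (pvInverted dd).keys.Nodup := by
    rw [inverted_eq_flat]
    exact PySem.Dict.nodup_keys_foldl_modify_key _ _ _ _ _ (by simp [PySem.Dict.keys_empty])
  have hkeysE : (pvInverted dd).keys = PySem.Set.ofList ((pvFlat dd).map Prod.fst) := by
    rw [inverted_eq_flat, PySem.Dict.keys_foldl_modify_key, PySem.Dict.keys_empty,
      PySem.Set.update_nil_left]
  have hgetD : ∀ x, (pvInverted dd).getD x []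
      = ((dd.filter (fun p => p.2.contains x)).map Prod.fst) := by
    intro x
    rw [inverted_eq_flat, PySem.Dict.getD_foldl_modify_append, PySem.Dict.getD_empty,
      List.nil_append]
    exact block_eq dd hvals x
  have hvalues : (pvInverted dd).values
      = (pvInverted dd).keys.map (fun x => (pvInverted dd).getD x []) :=
    PySem.Dict.values_eq_map_keys _ hkn []
  rw [hpl, hvalues]
  have hper : ∀ x, (ordPairs ((pvInverted dd).getD x [])).count (db1, db2)
      = if x ∈ s1 ∧ x ∈ s2 then 1 else 0 := by
    intro x
    rw [hgetD x]
    exact per_elem_count U V db1 db2 s1 s2 hkeys h2 x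
  rw [count_sum _ _ _ _ s1 s2 hper]
  -- finally: filtering the distinct elements equals filtering s1
  have hsub : ∀ y ∈ s1, y ∈ (pvInverted dd).keys := by
    intro y hy
    rw [hkeysE]
    refine (PySem.Set.mem_ofList _ _).2 ?_
    refine List.mem_map.2 ⟨(y, db1), ?_, rfl⟩
    exact List.mem_flatMap.2 ⟨(db1, s1), hmem1, List.mem_map.2 ⟨y, hy, rfl⟩⟩
  have hEnd : (pvInverted dd).keys.Nodup := hkn
  have := filter_length_eq_of_mem_iff (p := fun x => decide (x ∈ s1 ∧ x ∈ s2))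
    (q := fun y => s2.contains y) hEnd hs1 ?_
  · rw [this]
  · intro x
    constructor
    · rintro ⟨_, hx⟩
      simp only [decide_eq_true_eq] at hx
      exact ⟨hx.1, by simp [hx.2]⟩
    · rintro ⟨hx1, hx2⟩
      refine ⟨hsub x hx1, ?_⟩
      simp only [decide_eq_true_eq]
      exact ⟨hx1, by simpa using hx2⟩

-- the size dictionary reads off the length of the stored set
theorem sizes_getD (dd : List (String × List String)) (hkeys : (dd.map Prod.fst).Nodup)
    {db : String} {s : List String} (hmem : (db, s) ∈ dd) :
    (pvSizes dd).getD db 0 = (s.length : Int) := by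
  have hitems : (pvSizes dd).items = dd.map (fun p => (p.1, (p.2.length : Int))) := by
    rw [pvSizes]
    have := PySem.Dict.items_foldl_insert_fresh dd (fun p => p.1) (fun p => (p.2.length : Int))
      PySem.Dict.empty (fun a _ => PySem.Dict.contains_empty _) hkeys
    simpa [PySem.Dict.items] using this
  refine PySem.Dict.getD_of_mem_items _ ?_ ?_ 0
  · rw [hitems]
    exact List.mem_map.2 ⟨(db, s), hmem, rfl⟩
  · show ((pvSizes dd).items.map Prod.fst).Nodup
    rw [hitems, List.map_map]
    simpa using hkeys

-- first-match lookup in a duplicate-free association list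
theorem dict_getD (dd : List (String × List String)) (hkeys : (dd.map Prod.fst).Nodup)
    {db : String} {s : List String} (hmem : (db, s) ∈ dd) :
    (PySem.Dict.mk dd).getD db [] = s :=
  PySem.Dict.getD_of_mem_items _ hmem (by simpa using hkeys) []

-- the four statistics agree for every emitted (earlier, later) key pair
theorem pair_stats_eq (U V : List (String × List String)) (db1 db2 : String)
    (s1 s2 : List String)
    (hkeys : ((U ++ (db1, s1) :: V).map Prod.fst).Nodup)
    (hvals : ∀ p ∈ U ++ (db1, s1) :: V, p.2.Nodup)
    (h2 : (db2, s2) ∈ V) :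
    fsaPairStatsA (PySem.Dict.mk (U ++ (db1, s1) :: V)) db1 db2
      = fsaPairStatsB (pvCo (U ++ (db1, s1) :: V)) (pvSizes (U ++ (db1, s1) :: V)) db1 db2 := by
  set dd := U ++ (db1, s1) :: V with hdd
  have hmem1 : (db1, s1) ∈ dd := by simp [hdd]
  have hmem2 : (db2, s2) ∈ dd := by simp [hdd, h2]
  have hs1 : s1.Nodup := hvals _ hmem1
  have hs2 : s2.Nodup := hvals _ hmem2
  have hl1 := dict_getD dd hkeys hmem1
  have hl2 := dict_getD dd hkeys hmem2
  have hz1 := sizes_getD dd hkeys hmem1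
  have hz2 := sizes_getD dd hkeys hmem2
  have hco := co_count U V db1 db2 s1 s2 hkeys hvals h2
  rw [← hdd] at hco
  -- the common intersection size
  set B : Nat := (s1.filter (fun y => s2.contains y)).length with hB
  set B2 : Nat := (s2.filter (fun y => s1.contains y)).length with hB2
  have hBB2 : B2 = B := by
    refine filter_length_eq_of_mem_iff hs2 hs1 ?_
    intro x
    simp only [List.contains_iff_mem]
    constructor
    · rintro ⟨h1, h2'⟩; exact ⟨by simpa using h2', by simp [h1]⟩
    · rintro ⟨h1, h2'⟩; exact ⟨by simpa using h2', by simp [h1]⟩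
  have hinter : (PySem.Set.inter s1 s2).length = B := rfl
  have hdiff1 : (PySem.Set.diff s1 s2).length = s1.length - B := by
    have := List.length_eq_length_filter_add (l := s1) (fun y => s2.contains y)
    have hd : PySem.Set.diff s1 s2 = s1.filter (fun y => !s2.contains y) := rfl
    rw [hd]; omega
  have hdiff1le : B ≤ s1.length := List.length_filter_le _ _
  have hdiff2 : (PySem.Set.diff s2 s1).length = s2.length - B2 := by
    have := List.length_eq_length_filter_add (l := s2) (fun y => s1.contains y)
    have hd : PySem.Set.diff s2 s1 = s2.filter (fun y => !s1.contains y) := rfl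
    rw [hd]; omega
  have hdiff2le : B2 ≤ s2.length := List.length_filter_le _ _
  have hunion : (PySem.Set.union s1 s2).length = s1.length + (s2.length - B2) := by
    have hu : PySem.Set.union s1 s2 = PySem.Set.update s1 s2 := rfl
    rw [hu, PySem.Set.update_eq_append_filter, List.length_append,
      PySem.Set.ofList_eq_self_of_nodup s2 hs2]
    have := List.length_eq_length_filter_add (l := s2) (fun y => PySem.Set.contains s1 y)
    have hflt : (s2.filter (fun y => s1.contains y)).length
        = (s2.filter (fun y => PySem.Set.contains s1 y)).length := rfl
    rw [hB2] at *
    omega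
  simp only [fsaPairStatsA, fsaPairStatsB, hl1, hl2, hz1, hz2, hco]
  rw [hinter, hdiff1, hdiff2, hunion, hBB2]
  have hc1 : ((s1.length - B : Nat) : Int) = (s1.length : Int) - (B : Int) := by omega
  have hc2 : ((s2.length - B : Nat) : Int) = (s2.length : Int) - (B : Int) := by omega
  have hc3 : ((s1.length + (s2.length - B) : Nat) : Int)
      = (s1.length : Int) + (s2.length : Int) - (B : Int) := by omega
  rw [hc1, hc2, hc3]

-- ===== VERDICT (by name: the statement is the Claim_ definition above) =====
theorem format_set_analysis_spec : Claim_equal_format_set_analysis := by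
  intro dd _ hPre
  obtain ⟨hkeys, hvals⟩ := hPre
  unfold Spec_format_set_analysis format_set_analysis format_set_analysis_alt
  dsimp only
  refine congrArg PySem.Dict.items ?_
  refine nested_foldl_congr (PySem.List.enumerate ((PySem.Dict.mk dd).keys))
    (fun p => PySem.List.slice ((PySem.Dict.mk dd).keys) (some (p.1 + 1)) none)
    (fun s p b => s.insert (p.2 ++ "_vs_" ++ b) (fsaPairStatsA (PySem.Dict.mk dd) p.2 b))
    (fun s p b => s.insert (p.2 ++ "_vs_" ++ b) (fsaPairStatsB (pvCo dd) (pvSizes dd) p.2 b))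
    PySem.Dict.empty ?_
  intro p hp db2 hdb2 s
  rcases (PySem.List.mem_enumerate_iff _ _ _).1 hp with ⟨k, hk, rfl⟩
  dsimp only at hdb2 ⊢
  have hcast : (0 : Int) + (k : Int) + 1 = ((k + 1 : Nat) : Int) := by push_cast; ring
  rw [hcast, PySem.List.slice_from_natCast] at hdb2
  have hdb2' : db2 ∈ (dd.drop (k + 1)).map Prod.fst := by
    rw [List.map_drop]; exact hdb2
  rcases List.mem_map.1 hdb2' with ⟨q, hq, rfl⟩
  have hklen : k < dd.length := by simpa using hk
  have hdecomp : dd = dd.take k ++ (dd[k].1, dd[k].2) :: dd.drop (k + 1) := by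
    conv_lhs => rw [← List.take_append_drop k dd, List.drop_eq_getElem_cons hklen]
  have hq' : (q.1, q.2) ∈ dd.drop (k + 1) := by simpa using hq
  have hstats := pair_stats_eq (dd.take k) (dd.drop (k + 1)) dd[k].1 q.1 dd[k].2 q.2
    (hdecomp ▸ hkeys) (hdecomp ▸ hvals) hq'
  rw [← hdecomp] at hstats
  have hget : ({ items := dd } : PySem.Dict String (List String)).keys[k]'hk = dd[k].1 := by
    show (dd.map Prod.fst)[k]'hk = dd[k].1
    exact List.getElem_map Prod.fst
  rw [hget, hstats]
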